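-- pv_equiv track=rewrite | github.com/FrancoB4/mtg_elo_manager | mtg_elo_backend/players/services/glicko2_service.py | sum_bo3_results
-- ===== SOURCE A (Python) =====
-- def sum_bo3_results(games: list) -> int:
--     cont = 0
--     for game in games:
--         if game == 1:
--             cont += 1
--         elif game == -1:
--             cont -= 1
--     return cont
-- ===== SOURCE B (Python) =====
-- def sum_bo3_results(games: list) -> int:
--     n = len(games)
--     if n == 0:
--         return 0
--     if n == 1:
--         g = games[0]
--         if g == 1:
--             return 1
--         if g == -1:
--             return -1
--         return 0
--     mid = n // 2
--     return sum_bo3_results(games[:mid]) + sum_bo3_results(games[mid:])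
-- ===== Notes on version B (the rewrite author's own statement) =====
-- stated objective: alternative
-- what changed: Replaces A's single branching accumulator loop with a divide-and-conquer recursion: split the list in halves, score each half recursively, and add the two subtotals (correct because the win/loss score is additive over concatenation).
import Mathlib
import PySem

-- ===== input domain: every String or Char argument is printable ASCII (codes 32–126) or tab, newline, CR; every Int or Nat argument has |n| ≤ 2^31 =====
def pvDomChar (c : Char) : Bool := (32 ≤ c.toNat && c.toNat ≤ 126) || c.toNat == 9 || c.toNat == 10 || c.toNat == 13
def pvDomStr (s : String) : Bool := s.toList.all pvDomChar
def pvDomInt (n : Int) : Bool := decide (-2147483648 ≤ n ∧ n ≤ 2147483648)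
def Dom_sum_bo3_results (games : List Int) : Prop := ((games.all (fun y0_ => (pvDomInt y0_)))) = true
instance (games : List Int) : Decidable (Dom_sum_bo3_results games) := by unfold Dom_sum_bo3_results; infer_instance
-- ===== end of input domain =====

-- B replaces A's branching accumulator loop with a divide-and-conquer recursion
-- (split in halves, score each half, add), correct because the score is additive
-- over concatenation (alternative decomposition, same O(n) cost).

-- ===== PORT A =====
def sum_bo3_results (games : List Int) : Int :=
  games.foldl (fun cont game =>
    if game == 1 then cont + 1
    else if game == -1 then cont - 1
    else cont) 0

-- ===== PORT B =====
-- fuel (= list length) only makes the halving recursion structural; it is a totality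
-- guard, never reached at 0 on a multi-element list since each half is strictly shorter.
def sbrHalve : Nat → List Int → Int
  | _, [] => 0
  | _, [g] => if g == 1 then 1 else if g == -1 then -1 else 0
  | 0, _ :: _ :: _ => 0  -- unreachable: fuel starts at the length and halves are shorter
  | fuel + 1, g1 :: g2 :: rest =>
      let mid := (g1 :: g2 :: rest).length / 2
      sbrHalve fuel ((g1 :: g2 :: rest).take mid) + sbrHalve fuel ((g1 :: g2 :: rest).drop mid)

def sum_bo3_results_alt (games : List Int) : Int :=
  sbrHalve games.length games

-- ===== PRECONDITION & SPEC =====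
def Spec_sum_bo3_results (games : List Int) (out : Int) : Prop := out = sum_bo3_results_alt games
instance (games : List Int) (out : Int) : Decidable (Spec_sum_bo3_results games out) := by unfold Spec_sum_bo3_results; infer_instance

-- ===== CLAIM (what is proved, stated in full; the proofs are below) =====
def Claim_equal_sum_bo3_results : Prop := ∀ (games : List Int), Dom_sum_bo3_results games → Spec_sum_bo3_results games (sum_bo3_results games)

-- ===== LEMMAS AND PROOFS =====
theorem sum_bo3_foldl_shift (games : List Int) : ∀ c : Int,
    games.foldl (fun cont game =>
      if game == 1 then cont + 1
      else if game == -1 then cont - 1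
      else cont) c
    = c + sum_bo3_results games := by
  induction games with
  | nil => intro c; simp [sum_bo3_results]
  | cons g t ih =>
    intro c
    simp only [sum_bo3_results, List.foldl_cons]
    rw [ih, ih]
    split_ifs <;> ring

theorem sum_bo3_append (l1 l2 : List Int) :
    sum_bo3_results (l1 ++ l2) = sum_bo3_results l1 + sum_bo3_results l2 := by
  unfold sum_bo3_results
  rw [List.foldl_append, sum_bo3_foldl_shift]
  rfl

theorem sbrHalve_eq_a : ∀ (fuel : Nat) (games : List Int), games.length ≤ fuel + 1 →
    sbrHalve fuel games = sum_bo3_results games := by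
  intro fuel
  induction fuel with
  | zero =>
    intro games h
    match games with
    | [] => rfl
    | [g] =>
      simp only [sbrHalve, sum_bo3_results, List.foldl_cons, List.foldl_nil]
      split_ifs <;> norm_num
  | succ n ih =>
    intro games h
    match games with
    | [] => rfl
    | [g] =>
      simp only [sbrHalve, sum_bo3_results, List.foldl_cons, List.foldl_nil]
      split_ifs <;> norm_num
    | g1 :: g2 :: rest =>
      rw [sbrHalve]
      simp only [List.length_cons] at h
      rw [ih _ (by simp only [List.length_take, List.length_cons]; omega),
          ih _ (by simp only [List.length_drop, List.length_cons]; omega),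
          ← sum_bo3_append, List.take_append_drop]

theorem alt_eq_a (games : List Int) : sum_bo3_results_alt games = sum_bo3_results games := by
  unfold sum_bo3_results_alt
  match games with
  | [] => rfl
  | g :: t => exact sbrHalve_eq_a _ _ (by simp)

-- ===== VERDICT (by name: the statement is the Claim_ definition above) =====
theorem sum_bo3_results_spec : Claim_equal_sum_bo3_results := by
  intro games _
  unfold Spec_sum_bo3_results
  rw [alt_eq_a]
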